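-- pv_equiv track=rewrite | github.com/mvah/POSG-multipath-forwarding | states_computation.py | number_of_states_per_packet_size
-- ===== SOURCE A (Python) =====
-- def number_of_states_per_packet_size(packet_size):
--     som = 0
--     for j in range(1, packet_size+1):
--         tmp = 1
--         for k in range(j, packet_size+1):
--             tmp = tmp*k
--         som = som + tmp
--     return som
-- ===== SOURCE B (Python) =====
-- def number_of_states_per_packet_size(packet_size):
--     som = 0
--     prod = 1
--     for j in range(packet_size, 0, -1):
--         prod = prod * j
--         som = som + prod
--     return som
-- ===== Notes on version B (the rewrite author's own statement) =====
-- stated objective: faster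
-- what changed: Replaces the nested loop (recomputing each falling product from scratch) with a single downward pass that maintains a running product and adds it to the sum.
import Mathlib
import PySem

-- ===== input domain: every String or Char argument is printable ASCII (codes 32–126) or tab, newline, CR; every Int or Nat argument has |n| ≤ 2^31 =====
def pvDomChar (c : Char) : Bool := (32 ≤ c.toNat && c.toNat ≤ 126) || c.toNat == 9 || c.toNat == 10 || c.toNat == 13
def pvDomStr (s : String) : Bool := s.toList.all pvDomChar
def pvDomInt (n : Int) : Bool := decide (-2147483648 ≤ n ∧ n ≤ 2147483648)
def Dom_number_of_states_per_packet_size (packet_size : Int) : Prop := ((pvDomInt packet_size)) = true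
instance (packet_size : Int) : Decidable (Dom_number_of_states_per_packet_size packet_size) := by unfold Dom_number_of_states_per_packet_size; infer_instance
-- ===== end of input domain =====

-- B is an O(n) single downward pass with a running product, replacing A's O(n^2) nested loops.

-- ===== PORT A =====
-- literal port of A: outer loop over range(1, n+1), inner loop recomputes each product
def number_of_states_per_packet_size (packet_size : Int) : Int :=
  (PySem.List.pyRange 1 (packet_size + 1) 1).foldl
    (fun som j =>
      som + (PySem.List.pyRange j (packet_size + 1) 1).foldl (fun tmp k => tmp * k) 1)
    0

-- ===== PORT B =====
-- literal port of B: one loop over range(n, 0, -1) carrying (prod, som)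
def number_of_states_per_packet_size_alt (packet_size : Int) : Int :=
  ((PySem.List.pyRange packet_size 0 (-1)).foldl
      (fun (s : Int × Int) j => (s.1 * j, s.2 + s.1 * j)) (1, 0)).2

-- ===== PRECONDITION & SPEC =====
def Spec_number_of_states_per_packet_size (packet_size : Int) (out : Int) : Prop := out = number_of_states_per_packet_size_alt packet_size
instance (packet_size : Int) (out : Int) : Decidable (Spec_number_of_states_per_packet_size packet_size out) := by unfold Spec_number_of_states_per_packet_size; infer_instance

-- ===== CLAIM (what is proved, stated in full; the proofs are below) =====
def Claim_equal_number_of_states_per_packet_size : Prop := ∀ (packet_size : Int), Dom_number_of_states_per_packet_size packet_size → Spec_number_of_states_per_packet_size packet_size (number_of_states_per_packet_size packet_size)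

-- ===== LEMMAS AND PROOFS =====

-- the common mathematical value: F (m+1) = (m+1) * (F m + 1)
def pvF : Nat → Int
  | 0 => 0
  | m + 1 => ((m : Int) + 1) * (pvF m + 1)

-- inner product of A: multiplying over j..n with any initial tmp
theorem pv_inner_append (l : List Int) (x t : Int) :
    (l ++ [x]).foldl (fun tmp k => tmp * k) t = l.foldl (fun tmp k => tmp * k) t * x := by
  simp [List.foldl_append]

-- outer loop of A as init + sum of products
theorem pv_outer_sum (l : List Int) (f : Int → Int) (s : Int) :
    l.foldl (fun som j => som + f j) s = s + (l.map f).sum := by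
  induction l generalizing s with
  | nil => simp
  | cons a l ih => simp [List.foldl_cons, ih, add_assoc]

theorem pvA_eq_F (m : Nat) :
    number_of_states_per_packet_size (m : Int) = pvF m := by
  induction m with
  | zero =>
    simp [number_of_states_per_packet_size, pvF, PySem.List.pyRange_one_eq_nil]
  | succ m ih =>
    have hsplit : PySem.List.pyRange 1 ((m : Int) + 1 + 1) 1
        = PySem.List.pyRange 1 ((m : Int) + 1) 1 ++ [(m : Int) + 1] :=
      PySem.List.pyRange_one_succ_right (by omega)
    have hinner : ∀ j ∈ PySem.List.pyRange 1 ((m : Int) + 1) 1,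
        (PySem.List.pyRange j ((m : Int) + 1 + 1) 1).foldl (fun tmp k => tmp * k) 1
        = (PySem.List.pyRange j ((m : Int) + 1) 1).foldl (fun tmp k => tmp * k) 1 * ((m : Int) + 1) := by
      intro j hj
      rw [PySem.List.mem_pyRange_one] at hj
      rw [PySem.List.pyRange_one_succ_right (by omega), pv_inner_append]
    have hlast : (PySem.List.pyRange ((m : Int) + 1) ((m : Int) + 1 + 1) 1).foldl
        (fun tmp k => tmp * k) 1 = (m : Int) + 1 := by
      rw [PySem.List.pyRange_one_singleton]; simp
    unfold number_of_states_per_packet_size at *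
    simp only [Nat.cast_add, Nat.cast_one]
    rw [hsplit, pv_outer_sum, List.map_append, List.sum_append,
        List.map_congr_left hinner]
    rw [pv_outer_sum] at ih
    simp only [List.map_singleton, List.sum_singleton, hlast]
    have hmul : (List.map (fun j =>
        (PySem.List.pyRange j ((m : Int) + 1) 1).foldl (fun tmp k => tmp * k) 1 * ((m : Int) + 1))
        (PySem.List.pyRange 1 ((m : Int) + 1) 1)).sum
        = (List.map (fun j => (PySem.List.pyRange j ((m : Int) + 1) 1).foldl (fun tmp k => tmp * k) 1)
            (PySem.List.pyRange 1 ((m : Int) + 1) 1)).sum * ((m : Int) + 1) := by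
      rw [← List.sum_map_mul_right]
    rw [hmul]
    simp only [zero_add] at ih
    rw [ih]
    simp [pvF]; ring

-- B's loop from m with state (p, s) yields s + p * F m
theorem pvB_loop (m : Nat) : ∀ p s : Int,
    ((PySem.List.pyRange (m : Int) 0 (-1)).foldl
      (fun (st : Int × Int) j => (st.1 * j, st.2 + st.1 * j)) (p, s)).2
    = s + p * pvF m := by
  induction m with
  | zero =>
    intro p s
    simp [PySem.List.pyRange_neg_one_eq_nil, pvF]
  | succ m ih =>
    intro p s
    rw [show (((m + 1 : Nat)) : Int) = (m : Int) + 1 by push_cast; ring,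
        PySem.List.pyRange_neg_one_cons (by omega)]
    simp only [List.foldl_cons]
    rw [show (m : Int) + 1 - 1 = (m : Int) by ring, ih]
    simp [pvF]; ring

theorem pv_neg (n : Int) (h : n ≤ 0) :
    number_of_states_per_packet_size n = 0 ∧ number_of_states_per_packet_size_alt n = 0 := by
  constructor
  · unfold number_of_states_per_packet_size
    rw [PySem.List.pyRange_one_eq_nil (by omega)]; rfl
  · unfold number_of_states_per_packet_size_alt
    rw [PySem.List.pyRange_neg_one_eq_nil (by omega)]; rfl

-- ===== VERDICT (by name: the statement is the Claim_ definition above) =====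
theorem number_of_states_per_packet_size_spec : Claim_equal_number_of_states_per_packet_size := by
  intro n _
  unfold Spec_number_of_states_per_packet_size
  rcases le_or_gt n 0 with h | h
  · rcases pv_neg n h with ⟨h1, h2⟩; rw [h1, h2]
  · obtain ⟨m, rfl⟩ : ∃ m : Nat, n = (m : Int) := ⟨n.toNat, by omega⟩
    rw [pvA_eq_F m]
    unfold number_of_states_per_packet_size_alt
    rw [pvB_loop m 1 0]
    ring
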